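-- pv_equiv track=rewrite | github.com/RawitSHIE/Algorithms-Training-Python | OTP.py | compat_8
-- ===== SOURCE A (Python) =====
-- def compat_8(text):
--     """8 len"""
--     lst = []
--     for i in "0123456789":
--         if i in text:
--             lst += [str(text.count(i))]
--     if lst.count("3") == 2 and lst.count("2") == 0 and lst.count("1") == 2 and len(lst) == 4:
--         return "Valid"
--     elif lst.count("2") == 3 and lst.count("1") == 2 and len(lst) == 5:
--         return "Valid"
--     else:
--         return "Invalid"
-- ===== SOURCE B (Python) =====
-- def compat_8(text):
--     """8 len"""
--     digits = sorted(c for c in text if c in "0123456789")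
--
--     def runs(xs):
--         if not xs:
--             return []
--         n = 1
--         while n < len(xs) and xs[n] == xs[0]:
--             n += 1
--         return [n] + runs(xs[n:])
--
--     sig = sorted(runs(digits))
--     return "Valid" if sig == [1, 1, 3, 3] or sig == [1, 1, 2, 2, 2] else "Invalid"
-- ===== Notes on version B (the rewrite author's own statement) =====
-- stated objective: alternative
-- what changed: B sorts the digit characters of the text and recursively splits the sorted list into runs of equal characters, then compares the sorted run-length list to [1,1,3,3] / [1,1,2,2,2]; a sort-then-group-runs algorithm with no per-digit counting and no histogram, versus A's ten str.count scans over stringified counts.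
import Mathlib
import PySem

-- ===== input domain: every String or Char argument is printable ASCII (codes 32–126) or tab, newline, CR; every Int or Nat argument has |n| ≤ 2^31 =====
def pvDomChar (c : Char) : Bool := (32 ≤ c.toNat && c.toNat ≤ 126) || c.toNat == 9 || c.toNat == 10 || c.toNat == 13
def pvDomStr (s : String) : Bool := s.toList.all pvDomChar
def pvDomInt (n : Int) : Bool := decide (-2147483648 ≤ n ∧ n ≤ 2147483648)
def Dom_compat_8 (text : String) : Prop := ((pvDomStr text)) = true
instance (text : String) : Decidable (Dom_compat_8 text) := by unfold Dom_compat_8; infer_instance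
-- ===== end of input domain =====

-- B sorts the digit characters of the text and recursively splits the sorted list into
-- runs of equal characters, comparing the sorted run-length list to [1,1,3,3] / [1,1,2,2,2];
-- a sort-then-group-runs alternative to A's per-digit str.count scans.

-- ===== PORT A =====
def compat_8 (text : String) : String :=
  let lst : List String := "0123456789".toList.foldl
    (fun lst i =>
      if PySem.Str.isIn (String.singleton i) text then
        lst ++ [PySem.Int.toStr (PySem.Str.count text (String.singleton i) : Int)]
      else lst) []
  if PySem.List.count lst "3" == 2 && PySem.List.count lst "2" == 0
      && PySem.List.count lst "1" == 2 && lst.length == 4 then "Valid"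
  else if PySem.List.count lst "2" == 3 && PySem.List.count lst "1" == 2
      && lst.length == 5 then "Valid"
  else "Invalid"

-- ===== PORT B =====
-- runs xs: the Python inner while loop counts the leading elements equal to xs[0]
-- (= the span of (· == head)), then recurses on the remainder xs[n:].
def pvRuns : List Char → List Int
  | [] => []
  | c :: t =>
    let pr := t.span (fun x => x == c)
    ((pr.1.length : Int) + 1) :: pvRuns pr.2
termination_by l => l.length
decreasing_by
  simp only [List.span_eq_takeWhile_dropWhile]
  have := (List.dropWhile_sublist (l := t) (p := fun x => x == c)).length_le
  simpa using Nat.lt_succ_of_le this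

def compat_8_alt (text : String) : String :=
  let digits : List Char := PySem.List.sorted
    (text.toList.filter (fun c => PySem.Str.isIn (String.singleton c) "0123456789"))
    (fun x => x) false
  let sig := PySem.List.sorted (pvRuns digits) (fun x => x) false
  if sig = [1, 1, 3, 3] ∨ sig = [1, 1, 2, 2, 2] then "Valid" else "Invalid"

-- ===== PRECONDITION & SPEC =====
def Spec_compat_8 (text : String) (out : String) : Prop := out = compat_8_alt text
instance (text : String) (out : String) : Decidable (Spec_compat_8 text out) := by unfold Spec_compat_8; infer_instance

-- ===== CLAIM (what is proved, stated in full; the proofs are below) =====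
def Claim_equal_compat_8 : Prop := ∀ (text : String), Dom_compat_8 text → Spec_compat_8 text (compat_8 text)

-- ===== LEMMAS AND PROOFS =====

theorem isIn_singleton (c : Char) (s : String) :
    PySem.Str.isIn (String.singleton c) s = decide (c ∈ s.toList) := by
  have h : (String.singleton c).toList = [c] := by simp
  by_cases hm : c ∈ s.toList
  · simp only [hm, decide_true]
    rw [PySem.Str.isIn_iff_infix, h]
    obtain ⟨l1, l2, he⟩ := List.append_of_mem hm
    exact ⟨l1, l2, by simp [he]⟩
  · simp only [hm, decide_false]
    rw [← Bool.not_eq_true, PySem.Str.isIn_iff_infix, h]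
    intro hinf
    exact hm (hinf.mem (by simp))

theorem count_go_singleton (c : Char) (l : List Char) : ∀ (fuel acc : Nat), l.length ≤ fuel →
    PySem.Chars.count.go [c] fuel l acc = acc + l.count c := by
  induction l with
  | nil => intro fuel acc _; cases fuel <;> simp [PySem.Chars.count.go]
  | cons h t ih =>
    intro fuel acc hf
    cases fuel with
    | zero => simp at hf
    | succ f =>
      simp only [PySem.Chars.count.go]
      by_cases hc : c = h
      · subst hc
        simp only [List.isPrefixOf, BEq.rfl, Bool.and_self, if_true,
          List.length_singleton, List.drop_one, List.tail_cons]
        rw [ih f (acc + 1) (by simpa using Nat.le_of_succ_le_succ hf)]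
        simp
        omega
      · have hp : (List.isPrefixOf [c] (h :: t)) = false := by
          simp [List.isPrefixOf, hc]
        simp only [hp]
        rw [ih f acc (by simpa using Nat.le_of_succ_le_succ hf)]
        have h2 : h ≠ c := fun e => hc e.symm
        simp [h2]

theorem count_singleton (s : String) (c : Char) :
    PySem.Str.count s (String.singleton c) = s.toList.count c := by
  rw [PySem.Str.count, String.toList_singleton, PySem.Chars.count]
  simp only [List.isEmpty_cons, Bool.false_eq_true, if_false]
  simpa using count_go_singleton c s.toList s.toList.length 0 (le_refl _)

theorem toDigitsCore_len_lb (b : Nat) : ∀ (f m : Nat) (l : List Char), 0 < f →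
    l.length + 1 ≤ (Nat.toDigitsCore b f m l).length := by
  intro f
  induction f with
  | zero => intro m l h; omega
  | succ f ih =>
    intro m l _
    simp only [Nat.toDigitsCore]
    by_cases h : m / b = 0
    · simp [h]
    · simp only [h, if_false]
      cases f with
      | zero => simp [Nat.toDigitsCore]
      | succ f =>
        have := ih (m / b) (Nat.digitChar (m % b) :: l) (Nat.succ_pos f)
        simp at this ⊢
        omega

theorem toDigits_small (m : Nat) (h : m < 10) : Nat.toDigits 10 m = [Nat.digitChar m] := by
  interval_cases m <;> decide

theorem toStr_eq_digit (v : Int) (d : Nat) (hd : d < 10) :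
    (PySem.Int.toStr v = PySem.Int.toStr (d : Int)) ↔ v = (d : Int) := by
  constructor
  · intro h
    have h2 : PySem.Int.toChars v = PySem.Int.toChars (d : Int) := by
      have := congrArg String.toList h
      simpa [PySem.Int.toList_toStr] using this
    have hdchars : PySem.Int.toChars (d : Int) = [Nat.digitChar d] := by
      simp [PySem.Int.toChars, toDigits_small d hd]
    rw [hdchars] at h2
    by_cases hv : v < 0
    · rw [PySem.Int.toChars, if_pos hv] at h2
      have hne : '-' = Nat.digitChar d := List.head_eq_of_cons_eq h2
      exfalso
      revert hne
      interval_cases d <;> exact fun hne => absurd hne (by decide)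
    · rw [PySem.Int.toChars, if_neg hv] at h2
      by_cases hb : v.toNat < 10
      · rw [toDigits_small _ hb] at h2
        have hinj : Nat.digitChar v.toNat = Nat.digitChar d := List.head_eq_of_cons_eq h2
        have hvd : v.toNat = d := by
          revert hinj
          interval_cases h : v.toNat <;> interval_cases d <;> first | (intro _; rfl) | (intro hinj; exact absurd hinj (by decide))
        omega
      · exfalso
        have hm : ¬ (v.toNat / 10 = 0) := by omega
        have hlen : 2 ≤ (Nat.toDigits 10 v.toNat).length := by
          rw [show Nat.toDigits 10 v.toNat = Nat.toDigitsCore 10 (v.toNat + 1) v.toNat [] from rfl]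
          simp only [Nat.toDigitsCore, hm, if_false]
          have := toDigitsCore_len_lb 10 v.toNat (v.toNat / 10)
            [Nat.digitChar (v.toNat % 10)] (by omega)
          simpa using this
        rw [h2] at hlen
        simp at hlen
  · intro h; rw [h]

theorem countP_pair (a b : Int) (hab : a ≠ b) (l : List Int) :
    l.length = l.count a + l.count b + l.countP (fun v => !(v == a) && !(v == b)) := by
  induction l with
  | nil => simp
  | cons x t ih =>
    by_cases hxa : x = a
    · subst hxa; simp [hab]; omega
    · by_cases hxb : x = b
      · subst hxb; simp [hxa]; omega
      · simp [hxa, hxb]; omega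

theorem count_other (a b x : Int) (hab : a ≠ b) (l : List Int)
    (h : l.length = l.count a + l.count b) (hx : x ≠ a) (hx2 : x ≠ b) : l.count x = 0 := by
  have h1 := countP_pair a b hab l
  have h2 : l.countP (fun v => !(v == a) && !(v == b)) = 0 := by omega
  have h3 : l.count x ≤ l.countP (fun v => !(v == a) && !(v == b)) := by
    rw [List.count_eq_countP]
    exact List.countP_mono_left (by intro y _ hy; simp at hy ⊢; subst hy; exact ⟨hx, hx2⟩)
  omega

theorem perm_1133 (l : List Int) :
    (l.count 3 = 2 ∧ l.count 2 = 0 ∧ l.count 1 = 2 ∧ l.length = 4) ↔ l.Perm [1, 1, 3, 3] := by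
  constructor
  · rintro ⟨h3, _h2, h1, hl⟩
    rw [List.perm_iff_count]
    intro a
    by_cases ha1 : a = 1
    · subst ha1; simpa using h1
    · by_cases ha3 : a = 3
      · subst ha3; simpa using h3
      · rw [count_other 1 3 a (by decide) l (by omega) ha1 ha3]
        simp [Ne.symm ha1, Ne.symm ha3]
  · intro hp
    refine ⟨?_, ?_, ?_, ?_⟩ <;>
      simp [List.Perm.count_eq hp, List.Perm.length_eq hp]

theorem perm_11222 (l : List Int) :
    (l.count 2 = 3 ∧ l.count 1 = 2 ∧ l.length = 5) ↔ l.Perm [1, 1, 2, 2, 2] := by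
  constructor
  · rintro ⟨h2, h1, hl⟩
    rw [List.perm_iff_count]
    intro a
    by_cases ha1 : a = 1
    · subst ha1; simpa using h1
    · by_cases ha2 : a = 2
      · subst ha2; simpa using h2
      · rw [count_other 1 2 a (by decide) l (by omega) ha1 ha2]
        simp [Ne.symm ha1, Ne.symm ha2]
  · intro hp
    refine ⟨?_, ?_, ?_⟩ <;>
      simp [List.Perm.count_eq hp, List.Perm.length_eq hp]

-- count of a stringified digit in the mapped list is the count of the digit itself
theorem count_map_toStr (pres : List Char) (g : Char → Int) (d : Nat) (hd : d < 10) :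
    List.count (PySem.Int.toStr (d : Int)) (pres.map (fun c => PySem.Int.toStr (g c))) =
      List.count (d : Int) (pres.map g) := by
  rw [List.count_eq_countP, List.count_eq_countP, List.countP_map, List.countP_map]
  apply List.countP_congr
  intro c _
  simp only [Function.comp_apply, beq_iff_eq]
  exact toStr_eq_digit (g c) d hd

-- sorted(l) equals a ≤-ordered literal list exactly when l is a permutation of it
theorem sorted_eq_iff_perm (l L : List Int) (hL : L.Pairwise (fun a b => a ≤ b)) :
    PySem.List.sorted l (fun x => x) false = L ↔ l.Perm L := by
  constructor
  · intro h
    have := PySem.List.sorted_perm l (fun x => x) false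
    rw [h] at this
    exact this.symm
  · intro hp
    exact PySem.List.sorted_id_eq_of_perm_of_pairwise l L hp.symm hL

-- in a ≤-sorted list, after dropping the leading block of c's no c remains
theorem not_mem_dropWhile_sorted (c : Char) (t : List Char)
    (hc : ∀ x ∈ t, c ≤ x) (ht : t.Pairwise (· ≤ ·)) :
    ∀ x ∈ t.dropWhile (fun x => x == c), x ≠ c := by
  induction t with
  | nil => simp
  | cons d r ih =>
    rw [List.dropWhile_cons]
    rcases List.pairwise_cons.mp ht with ⟨hd, hr⟩
    by_cases hdc : (d == c) = true
    · rw [if_pos hdc]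
      exact ih (fun x hx => hc x (List.mem_cons_of_mem _ hx)) hr
    · rw [if_neg hdc]
      have hdc' : d ≠ c := by simpa using hdc
      have hcd : c < d := lt_of_le_of_ne (hc d (List.mem_cons_self)) (Ne.symm hdc')
      intro x hx
      rcases List.mem_cons.mp hx with h | h
      · subst h; exact hdc'
      · exact ne_of_gt (lt_of_lt_of_le hcd (hd x h))

-- run lengths of a ≤-sorted list are a permutation of the counts of its distinct elements
theorem runs_perm : ∀ (n : Nat) (l : List Char), l.length ≤ n → l.Pairwise (· ≤ ·) →
    (pvRuns l).Perm ((PySem.Set.ofList l).map (fun x => (l.count x : Int))) := by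
  intro n
  induction n with
  | zero =>
    intro l hl _
    have : l = [] := List.eq_nil_of_length_eq_zero (Nat.le_zero.mp hl)
    subst this
    simp [pvRuns]
  | succ n ih =>
    intro l hl hs
    cases l with
    | nil => simp [pvRuns]
    | cons c t =>
      rcases List.pairwise_cons.mp hs with ⟨hc, ht⟩
      set pref := t.takeWhile (fun x => x == c) with hpref
      set rest := t.dropWhile (fun x => x == c) with hrest
      have hsplit : t = pref ++ rest := (List.takeWhile_append_dropWhile).symm
      have hpref_all : ∀ x ∈ pref, x = c := by
        intro x hx
        have := List.mem_takeWhile_imp hx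
        simpa using this
      have hrest_ne : ∀ x ∈ rest, x ≠ c := not_mem_dropWhile_sorted c t hc ht
      have hrest_sorted : rest.Pairwise (· ≤ ·) :=
        ht.sublist (List.dropWhile_sublist _)
      have hrest_len : rest.length ≤ n := by
        have h1 : rest.length ≤ t.length := (List.dropWhile_sublist _).length_le
        have h2 : (c :: t).length ≤ n + 1 := hl
        simp at h2; omega
      -- unfold pvRuns on c :: t
      have hruns : pvRuns (c :: t) = ((pref.length : Int) + 1) :: pvRuns rest := by
        rw [pvRuns]
        simp only [List.span_eq_takeWhile_dropWhile]
        rfl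
      -- counts
      have hcount_c : ((c :: t).count c : Int) = (pref.length : Int) + 1 := by
        have hcp : pref.count c = pref.length :=
          List.count_eq_length.mpr (fun b hb => (hpref_all b hb).symm)
        have hcr : rest.count c = 0 :=
          List.count_eq_zero.mpr (fun hmem => (hrest_ne c hmem) rfl)
        rw [hsplit]
        simp [List.count_append, hcp, hcr]
      have hcount_ne : ∀ x, x ≠ c → (c :: t).count x = rest.count x := by
        intro x hx
        have hcp : pref.count x = 0 :=
          List.count_eq_zero.mpr (fun hmem => hx (hpref_all x hmem))
        rw [hsplit]
        simp [List.count_cons, List.count_append, hcp]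
        exact fun e => hx e.symm
      -- distinct elements
      have hc_not_mem : c ∉ rest := fun hmem => (hrest_ne c hmem) rfl
      have hset : (PySem.Set.ofList (c :: t)).Perm (c :: PySem.Set.ofList rest) := by
        rw [List.perm_ext_iff_of_nodup (PySem.Set.nodup_ofList _)
          (List.nodup_cons.mpr ⟨by simpa [PySem.Set.mem_ofList] using hc_not_mem,
            PySem.Set.nodup_ofList _⟩)]
        intro a
        simp only [PySem.Set.mem_ofList, List.mem_cons]
        constructor
        · rintro (h | h)
          · exact Or.inl h
          · rw [hsplit] at h
            rcases List.mem_append.mp h with h | h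
            · exact Or.inl (hpref_all a h)
            · exact Or.inr h
        · rintro (h | h)
          · exact Or.inl h
          · exact Or.inr (by rw [hsplit]; exact List.mem_append_right _ h)
      -- assemble
      rw [hruns]
      have hmapfix : (PySem.Set.ofList rest).map (fun x => ((c :: t).count x : Int))
          = (PySem.Set.ofList rest).map (fun x => (rest.count x : Int)) := by
        apply List.map_congr_left
        intro a ha
        rw [PySem.Set.mem_ofList] at ha
        rw [hcount_ne a (hrest_ne a ha)]
      have hchain : (((pref.length : Int) + 1) :: pvRuns rest).Perm
          ((c :: PySem.Set.ofList rest).map (fun x => ((c :: t).count x : Int))) := by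
        simp only [List.map_cons, hcount_c, hmapfix]
        exact (ih rest hrest_len hrest_sorted).cons _
      exact hchain.trans ((hset.map _).symm)

theorem main (text : String) : compat_8 text = compat_8_alt text := by
  have digitsNodup : ("0123456789".toList).Nodup := by decide
  set T := text.toList with hT
  set q : Char → Bool := fun c => decide (c ∈ "0123456789".toList) with hq
  set ds : List Char := T.filter q with hds
  set pres : List Char := "0123456789".toList.filter (fun d => decide (d ∈ T)) with hpres
  set g : Char → Int := fun c => (T.count c : Int) with hg
  -- A's list
  have hA : compat_8 text =
      (if List.count "3" (pres.map (fun c => PySem.Int.toStr (g c))) == 2 &&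
          List.count "2" (pres.map (fun c => PySem.Int.toStr (g c))) == 0 &&
          List.count "1" (pres.map (fun c => PySem.Int.toStr (g c))) == 2 &&
          (pres.map (fun c => PySem.Int.toStr (g c))).length == 4 then "Valid"
       else if List.count "2" (pres.map (fun c => PySem.Int.toStr (g c))) == 3 &&
          List.count "1" (pres.map (fun c => PySem.Int.toStr (g c))) == 2 &&
          (pres.map (fun c => PySem.Int.toStr (g c))).length == 5 then "Valid"
       else "Invalid") := by
    rw [compat_8]
    rw [PySem.List.foldl_append_if
      (fun i => PySem.Str.isIn (String.singleton i) text)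
      (fun i => PySem.Int.toStr (PySem.Str.count text (String.singleton i) : Int))
      "0123456789".toList []]
    have h1 : List.filter (fun i => PySem.Str.isIn (String.singleton i) text)
        "0123456789".toList = pres := by
      rw [hpres]; apply List.filter_congr; intro c _; rw [isIn_singleton]
    have h2 : ∀ c, PySem.Int.toStr (PySem.Str.count text (String.singleton c) : Int)
        = PySem.Int.toStr (g c) := by
      intro c; rw [count_singleton, hg]
    simp only [h1, List.nil_append, PySem.List.count_eq]
    rw [List.map_congr_left (fun c _ => h2 c)]
  -- B's digit list
  have hfilter : text.toList.filter (fun c => PySem.Str.isIn (String.singleton c) "0123456789")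
      = ds := by
    rw [hds, hT]; apply List.filter_congr; intro c _; rw [isIn_singleton, hq]
  set ds' : List Char := PySem.List.sorted ds (fun x => x) false with hds'
  have hds'_perm : ds'.Perm ds := PySem.List.sorted_perm ds (fun x => x) false
  have hds'_sorted : ds'.Pairwise (· ≤ ·) :=
    PySem.List.sorted_pairwise ds (fun x => x)
  -- the run lengths of B's sorted digit list are a permutation of A's count list
  have hr := runs_perm ds'.length ds' (le_refl _) hds'_sorted
  have hp1 : (PySem.Set.ofList ds').Perm pres := by
    rw [List.perm_ext_iff_of_nodup (PySem.Set.nodup_ofList ds') (digitsNodup.filter _)]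
    intro a
    simp only [PySem.Set.mem_ofList, hds'_perm.mem_iff, hds, List.mem_filter, hq, decide_eq_true_eq]
    tauto
  have hmapeq : (PySem.Set.ofList ds').map (fun x => (ds'.count x : Int))
      = (PySem.Set.ofList ds').map g := by
    apply List.map_congr_left
    intro a ha
    rw [PySem.Set.mem_ofList, hds'_perm.mem_iff, hds, List.mem_filter] at ha
    rw [hds'_perm.count_eq, hds, List.count_filter ha.2, hg]
  have hperm : (pvRuns ds').Perm (pres.map g) := by
    rw [hmapeq] at hr
    exact hr.trans (hp1.map g)
  have hsorted : PySem.List.sorted (pvRuns ds') (fun x => x) false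
      = PySem.List.sorted (pres.map g) (fun x => x) false :=
    PySem.List.sorted_eq_sorted_of_perm _ _ _ (fun a b h => h) hperm
  rw [hA, compat_8_alt]
  simp only [hfilter, ← hds', hsorted]
  -- now both sides are conditions on pres.map g
  set vals : List Int := pres.map g with hvals
  have hl : (pres.map (fun c => PySem.Int.toStr (g c))).length = vals.length := by
    simp [hvals]
  have e1 : (List.count "3" (pres.map (fun c => PySem.Int.toStr (g c))) == 2 &&
      List.count "2" (pres.map (fun c => PySem.Int.toStr (g c))) == 0 &&
      List.count "1" (pres.map (fun c => PySem.Int.toStr (g c))) == 2 &&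
      (pres.map (fun c => PySem.Int.toStr (g c))).length == 4) = true ↔
      PySem.List.sorted vals (fun x => x) false = [1, 1, 3, 3] := by
    rw [sorted_eq_iff_perm _ _ (by decide), ← perm_1133]
    have c3 := count_map_toStr pres g 3 (by norm_num)
    have c2 := count_map_toStr pres g 2 (by norm_num)
    have c1 := count_map_toStr pres g 1 (by norm_num)
    norm_num at c3 c2 c1
    simp only [Bool.and_eq_true, beq_iff_eq]
    rw [show ("3" : String) = PySem.Int.toStr 3 by decide,
        show ("2" : String) = PySem.Int.toStr 2 by decide,
        show ("1" : String) = PySem.Int.toStr 1 by decide,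
        c3, c2, c1, hl]
    tauto
  have e2 : (List.count "2" (pres.map (fun c => PySem.Int.toStr (g c))) == 3 &&
      List.count "1" (pres.map (fun c => PySem.Int.toStr (g c))) == 2 &&
      (pres.map (fun c => PySem.Int.toStr (g c))).length == 5) = true ↔
      PySem.List.sorted vals (fun x => x) false = [1, 1, 2, 2, 2] := by
    rw [sorted_eq_iff_perm _ _ (by decide), ← perm_11222]
    have c2 := count_map_toStr pres g 2 (by norm_num)
    have c1 := count_map_toStr pres g 1 (by norm_num)
    norm_num at c2 c1
    simp only [Bool.and_eq_true, beq_iff_eq]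
    rw [show ("2" : String) = PySem.Int.toStr 2 by decide,
        show ("1" : String) = PySem.Int.toStr 1 by decide,
        c2, c1, hl]
    tauto
  by_cases h1 : PySem.List.sorted vals (fun x => x) false = [1, 1, 3, 3]
  · rw [if_pos (e1.mpr h1), if_pos (Or.inl h1)]
  · by_cases h2 : PySem.List.sorted vals (fun x => x) false = [1, 1, 2, 2, 2]
    · rw [if_neg (fun hc => h1 (e1.mp hc)), if_pos (e2.mpr h2), if_pos (Or.inr h2)]
    · rw [if_neg (fun hc => h1 (e1.mp hc)), if_neg (fun hc => h2 (e2.mp hc)),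
        if_neg (by tauto)]

-- ===== VERDICT (by name: the statement is the Claim_ definition above) =====
theorem compat_8_spec : Claim_equal_compat_8 := by
  intro text _
  unfold Spec_compat_8
  exact main text
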